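-- pv_equiv track=rewrite | github.com/pypi-data/pypi-mirror-217 | packages/janus-sim/janus_sim-0.0.1-py3-none-any.whl/janus/graph_util.py | collapse_tree
-- ===== SOURCE A (Python) =====
-- from typing import Dict, List, Tuple, Set
--
-- Graph = Dict[int, List[int]]
--
-- def collapse_tree(tree: Graph, root_id: int) -> Tuple[List[List[int]], Graph]:
--   """Transforms tree by combining unbranched chains of nodes.
--
--   Args:
--     tree: The tree to transform
--     root_id: The id of the tree root node.
--
--   Returns:
--     chains: A list of nodes in the new tree. Each node is made up of a list of nodes in the
--       previous tree. The id of each node is indicated by its position in the list.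
--     chain_tree: The new tree, with node ids as indicated in chains.
--   """
--   if len(tree) == 0:
--     return [[root_id]], {}
--
--   assert root_id in tree
--   chains = [[root_id]]
--   chain_tree = {}
--   to_expand = [(int(0), x) for x in tree[root_id]]
--   while len(to_expand) > 0:
--     parent_chain_id, cur_chain_start_id = to_expand.pop()
--     cur_chain_id = len(chains)
--     cur_chain = [cur_chain_start_id]
--     while cur_chain[-1] in tree and len(tree[cur_chain[-1]]) == 1:
--       cur_chain.append(tree[cur_chain[-1]][0])
--     chains.append(cur_chain)
--     if parent_chain_id in chain_tree:
--       chain_tree[parent_chain_id].append(cur_chain_id)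
--     else:
--       chain_tree[parent_chain_id] = [cur_chain_id]
--     if cur_chain[-1] in tree:
--       to_expand.extend([(cur_chain_id, x) for x in tree[cur_chain[-1]]])
--   return chains, chain_tree
-- ===== SOURCE B (Python) =====
-- def collapse_tree(tree, root_id):
--   """Pure-functional re-implementation: recursion returns (chains, edges) with chain
--   ids computed from an offset; chain_tree is assembled afterwards by grouping the
--   edge list, instead of mutating a shared chains list and dict inside a stack loop."""
--   if len(tree) == 0:
--     return [[root_id]], {}
--
--   assert root_id in tree
--
--   def chain_from(start):
--     chain = [start]
--     while chain[-1] in tree and len(tree[chain[-1]]) == 1: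
--       chain.append(tree[chain[-1]][0])
--     return chain
--
--   def build(items, offset):
--     # items: pending (parent_chain_id, start) pairs; returns (chains, edges)
--     if not items:
--       return [], []
--     (parent, start), rest = items[0], items[1:]
--     chain = chain_from(start)
--     kid_items = []
--     if chain[-1] in tree:
--       kid_items = [(offset, x) for x in reversed(tree[chain[-1]])]
--     sub_chains, sub_edges = build(kid_items, offset + 1)
--     rest_chains, rest_edges = build(rest, offset + 1 + len(sub_chains))
--     return ([chain] + sub_chains + rest_chains,
--             [(parent, offset)] + sub_edges + rest_edges)
--
--   chains, edges = build([(0, x) for x in reversed(tree[root_id])], 1)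
--   chain_tree = {}
--   for p, c in edges:
--     chain_tree.setdefault(p, []).append(c)
--   return [[root_id]] + chains, chain_tree
-- ===== Notes on version B (the rewrite author's own statement) =====
-- stated objective: alternative
-- what changed: Replaces A's stateful work-stack loop (shared chains list plus in-place dict updates per iteration) with a pure recursion that returns (chains, edges) pairs with chain ids computed from an offset, then groups the edge list into chain_tree in a separate final pass.
import Mathlib
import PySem

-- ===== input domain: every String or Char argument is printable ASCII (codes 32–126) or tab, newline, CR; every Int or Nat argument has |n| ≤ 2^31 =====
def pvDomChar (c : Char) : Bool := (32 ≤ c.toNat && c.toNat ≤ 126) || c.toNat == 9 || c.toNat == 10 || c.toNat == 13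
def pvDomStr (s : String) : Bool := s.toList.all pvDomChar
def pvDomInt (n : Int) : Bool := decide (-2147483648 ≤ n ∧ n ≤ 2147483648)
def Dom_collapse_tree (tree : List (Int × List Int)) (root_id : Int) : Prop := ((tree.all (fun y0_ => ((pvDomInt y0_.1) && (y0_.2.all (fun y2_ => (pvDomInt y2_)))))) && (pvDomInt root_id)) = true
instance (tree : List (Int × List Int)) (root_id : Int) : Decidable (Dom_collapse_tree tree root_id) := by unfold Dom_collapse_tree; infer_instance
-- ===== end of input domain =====

-- B replaces A's stateful stack loop (shared chains list + in-place dict) by a pure recursion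
-- returning (chains, edges) with ids computed from an offset, grouping the edge list into the
-- dict at the end; objective: alternative (same asymptotic cost).

-- ===== PORT A =====
-- dict lookup on the tree (Python: tree[k] / k in tree)
def tlook (tree : List (Int × List Int)) (k : Int) : Option (List Int) :=
  PySem.Dict.get? (PySem.Dict.mk tree) k

-- A's inner while: follow single-child nodes appending to cur_chain; fuel makes it total,
-- returns (cur_chain, cur_chain[-1])
def followChain (tree : List (Int × List Int)) : Nat → List Int → Int → List Int × Int
  | 0, chain, last => (chain, last)
  | f + 1, chain, last =>
    match tlook tree last with
    | some [c] => followChain tree f (chain ++ [c]) c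
    | _ => (chain, last)

-- one iteration of A's outer while: grow the chain, append it to chains, record its id under
-- the parent chain in the dict, return the child work items
def doNode (tree : List (Int × List Int)) (ifuel : Nat) (parent : Int) (start : Int)
    (st : List (List Int) × PySem.Dict Int (List Int)) :
    (List (List Int) × PySem.Dict Int (List Int)) × List (Int × Int) :=
  let cid : Int := st.1.length
  let fc := followChain tree ifuel [start] start
  let chains' := st.1 ++ [fc.1]
  let ct' := if PySem.Dict.contains st.2 parent
             then PySem.Dict.modify st.2 parent [] (fun l => l ++ [cid])
             else PySem.Dict.insert st.2 parent [cid]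
  let kids := match tlook tree fc.2 with
    | some cs => cs.map (fun x => (cid, x))
    | none => []
  ((chains', ct'), kids)

-- A's while loop over the to_expand stack. The stack is stored top-first (pop = head), so
-- Python's extend at the end becomes prepending the reversed child list; fuel makes the loop
-- total and the remaining fuel is returned (pure fuel plumbing)
def loopA (tree : List (Int × List Int)) (ifuel : Nat) :
    Nat → List (Int × Int) → List (List Int) × PySem.Dict Int (List Int) →
    (List (List Int) × PySem.Dict Int (List Int)) × Nat
  | f, [], st => (st, f)
  | 0, _ :: _, st => (st, 0)
  | f + 1, e :: rest, st =>
    let r := doNode tree ifuel e.1 e.2 st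
    loopA tree ifuel f (r.2.reverse ++ rest) r.1

def collapse_tree (tree : List (Int × List Int)) (root_id : Int) :
    List (List Int) × (List (Int × List Int)) :=
  if tree.length = 0 then ([[root_id]], [])
  else
    match tlook tree root_id with
    | none => ([[root_id]], [])  -- Python: `assert root_id in tree` raises; excluded by Pre_
    | some cs =>
      let r := loopA tree (tree.length + 2) ((tree.length + 2) ^ (tree.length + 3))
        ((cs.map (fun x => ((0 : Int), x))).reverse) ([[root_id]], PySem.Dict.empty)
      (r.1.1, (r.1.2).items)

-- ===== PORT B =====
-- Source B's chain_from: follow single-child nodes; built front-to-back by cons (fuel = totality)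
def chainFromB (tree : List (Int × List Int)) : Nat → Int → List Int
  | 0, x => [x]
  | f + 1, x =>
    match PySem.Dict.get? (PySem.Dict.mk tree) x with
    | some [c] => x :: chainFromB tree f c
    | _ => [x]

-- Source B's build over the list of pending (parent_chain_id, start) items: returns the pure pair
-- (chains, edges) of the forest, ids starting at `off`. `bnd` bounds the fuel `f` (structural
-- termination plumbing); the leftover fuel is threaded through and returned.
def buildB (tree : List (Int × List Int)) (ifuel : Nat) :
    Nat → Nat → List (Int × Int) → Int → (List (List Int) × List (Int × Int)) × Nat
  | _, 0, _, _ => (([], []), 0)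
  | 0, _ + 1, _, _ => (([], []), 0)  -- unreachable: the fuel never exceeds the bound
  | _ + 1, f + 1, [], _ => (([], []), f + 1)
  | bnd + 1, f + 1, e :: rest, off =>
    let chain := chainFromB tree ifuel e.2
    let kidItems :=
      match PySem.Dict.get? (PySem.Dict.mk tree) (chain.getLastD e.2) with
      | some cs => cs.reverse.map (fun x => (off, x))
      | none => []
    let sub := buildB tree ifuel bnd f kidItems (off + 1)
    let rst := buildB tree ifuel bnd sub.2 rest (off + 1 + sub.1.1.length)
    ((chain :: (sub.1.1 ++ rst.1.1), (e.1, off) :: (sub.1.2 ++ rst.1.2)), rst.2)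

-- Source B's final grouping pass: chain_tree.setdefault(p, []).append(c)
def growEdge (d : PySem.Dict Int (List Int)) (p c : Int) : PySem.Dict Int (List Int) :=
  match PySem.Dict.get? d p with
  | some l => PySem.Dict.insert d p (l ++ [c])
  | none => PySem.Dict.insert d p [c]

def collapse_tree_alt (tree : List (Int × List Int)) (root_id : Int) :
    List (List Int) × (List (Int × List Int)) :=
  if tree.length = 0 then ([[root_id]], [])
  else
    match PySem.Dict.get? (PySem.Dict.mk tree) root_id with
    | none => ([[root_id]], [])  -- assert fails in Python; excluded by Pre_
    | some cs =>
      let fl := (tree.length + 2) ^ (tree.length + 3)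
      let r := buildB tree (tree.length + 2) fl fl
        (cs.reverse.map (fun x => ((0 : Int), x))) 1
      ([root_id] :: r.1.1,
       (r.1.2.foldl (fun d e => growEdge d e.1 e.2) PySem.Dict.empty).items)

-- ===== PRECONDITION & SPEC =====
-- graph neighbourhood and bounded reachability, used only to state acyclicity in Pre_
def adjC (tree : List (Int × List Int)) (k : Int) : List Int := (tlook tree k).getD []

def reachN (tree : List (Int × List Int)) : Nat → List Int → List Int
  | 0, s => s
  | f + 1, s => reachN tree f (PySem.List.dedup (s ++ s.flatMap (adjC tree)))

-- Pre_ excludes: association lists with duplicate keys (no Python dict realises them); a nonempty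
-- tree whose root is not a key (A's `assert` raises AssertionError); and trees with a cycle
-- reachable from the root, on which A loops forever.
def Pre_collapse_tree (tree : List (Int × List Int)) (root_id : Int) : Prop :=
  (tree.map Prod.fst).Nodup ∧
  (tree = [] ∨ (tlook tree root_id).isSome) ∧
  (∀ k ∈ reachN tree (tree.length + 1) [root_id],
      k ∉ reachN tree (tree.length + 1) (adjC tree k))
instance (tree : List (Int × List Int)) (root_id : Int) : Decidable (Pre_collapse_tree tree root_id) := by
  unfold Pre_collapse_tree; infer_instance

def pvWitness_collapse_tree : (List (Int × List Int)) × Int := ([(0, [1, 2]), (1, [3])], 0)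

def Spec_collapse_tree (tree : List (Int × List Int)) (root_id : Int) (out : List (List Int) × (List (Int × List Int))) : Prop := out = collapse_tree_alt tree root_id
instance (tree : List (Int × List Int)) (root_id : Int) (out : List (List Int) × (List (Int × List Int))) : Decidable (Spec_collapse_tree tree root_id out) := by unfold Spec_collapse_tree; infer_instance

-- ===== CLAIM (what is proved, stated in full; the proofs are below) =====
def Claim_equal_collapse_tree : Prop := ∀ (tree : List (Int × List Int)) (root_id : Int), Dom_collapse_tree tree root_id → Pre_collapse_tree tree root_id → Spec_collapse_tree tree root_id (collapse_tree tree root_id)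

-- ===== LEMMAS AND PROOFS =====

-- chainFromB always starts with its argument
lemma chainFromB_cons (tree : List (Int × List Int)) :
    ∀ (f : Nat) (x : Int), ∃ t, chainFromB tree f x = x :: t := by
  intro f x
  cases f with
  | zero => exact ⟨[], rfl⟩
  | succ g =>
    simp only [chainFromB]
    cases PySem.Dict.get? (PySem.Dict.mk tree) x with
    | none => exact ⟨[], rfl⟩
    | some cs =>
      cases cs with
      | nil => exact ⟨[], rfl⟩
      | cons c cs' =>
        cases cs' with
        | nil => exact ⟨chainFromB tree g c, rfl⟩
        | cons _ _ => exact ⟨[], rfl⟩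

-- A's inner while = B's chain_from (chain and last element)
lemma follow_eq_chainFromB (tree : List (Int × List Int)) :
    ∀ (f : Nat) (chain : List Int) (last : Int),
      followChain tree f chain last =
        (chain ++ (chainFromB tree f last).tail, (chainFromB tree f last).getLastD last) := by
  intro f
  induction f with
  | zero => intro chain last; simp [followChain, chainFromB]
  | succ g ih =>
    intro chain last
    simp only [followChain, chainFromB]
    cases h : tlook tree last with
    | none => simp [tlook] at h; simp [h]
    | some cs =>
      have h' : PySem.Dict.get? (PySem.Dict.mk tree) last = some cs := h
      cases cs with
      | nil => simp [h']
      | cons c cs' =>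
        cases cs' with
        | cons _ _ => simp [h']
        | nil =>
          simp only [h']
          rw [ih]
          obtain ⟨t, ht⟩ := chainFromB_cons tree g c
          simp only [ht, List.tail_cons, List.getLastD]
          cases hg : (c :: t).getLast? with
          | none => simp at hg
          | some v => simp

-- A's dict-recording branch = B's growEdge grouping step
lemma dict_step_eq (d : PySem.Dict Int (List Int)) (p c : Int) :
    (if PySem.Dict.contains d p
     then PySem.Dict.modify d p [] (fun l => l ++ [c])
     else PySem.Dict.insert d p [c]) = growEdge d p c := by
  unfold growEdge
  cases h : PySem.Dict.get? d p with
  | none =>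
    have hc : PySem.Dict.contains d p = false := by
      rw [PySem.Dict.contains_eq_isSome_get?, h]; rfl
    simp [hc]
  | some l =>
    have hc : PySem.Dict.contains d p = true := by
      rw [PySem.Dict.contains_eq_isSome_get?, h]; rfl
    simp only [hc, if_true]
    simp [PySem.Dict.modify, PySem.Dict.getD_eq_get?_getD, h]

-- processing a concatenated stack = processing the prefix, then the suffix with the leftover fuel
lemma loopA_split (tree : List (Int × List Int)) (ifuel : Nat) :
    ∀ (f : Nat) (xs ys : List (Int × Int)) st,
      loopA tree ifuel f (xs ++ ys) st =
        loopA tree ifuel (loopA tree ifuel f xs st).2 ys (loopA tree ifuel f xs st).1 := by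
  intro f
  induction f with
  | zero =>
    intro xs ys st
    cases xs with
    | nil => simp [loopA]
    | cons e xs' => cases ys <;> simp [loopA]
  | succ g ih =>
    intro xs ys st
    cases xs with
    | nil => simp [loopA]
    | cons e xs' =>
      simp only [loopA, List.cons_append]
      rw [← List.append_assoc]
      exact ih _ _ _

-- the child work items A pushes for a finished chain (proof-side name for doNode's last field)
def kidsA (tree : List (Int × List Int)) (ifuel : Nat) (s : Int) (off : Int) : List (Int × Int) :=
  match tlook tree ((chainFromB tree ifuel s).getLastD s) with
  | some cs => cs.map (fun x => (off, x))
  | none => []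

-- doNode, written with B's vocabulary
lemma doNode_eq (tree : List (Int × List Int)) (ifuel : Nat) (p s : Int)
    (st : List (List Int) × PySem.Dict Int (List Int)) :
    doNode tree ifuel p s st =
      ((st.1 ++ [chainFromB tree ifuel s], growEdge st.2 p st.1.length),
       kidsA tree ifuel s st.1.length) := by
  unfold doNode kidsA
  rw [follow_eq_chainFromB]
  obtain ⟨t, ht⟩ := chainFromB_cons tree ifuel s
  simp [ht, dict_step_eq]

-- A pushes kids then pops LIFO; B lists them reversed
lemma kidsA_reverse (tree : List (Int × List Int)) (ifuel : Nat) (s off : Int) :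
    (kidsA tree ifuel s off).reverse =
      (match PySem.Dict.get? (PySem.Dict.mk tree) ((chainFromB tree ifuel s).getLastD s) with
       | some cs => cs.reverse.map (fun x => (off, x))
       | none => ([] : List (Int × Int))) := by
  unfold kidsA tlook
  cases PySem.Dict.get? (PySem.Dict.mk tree) ((chainFromB tree ifuel s).getLastD s) <;>
    simp [List.map_reverse]

-- buildB never returns more fuel than it was given
lemma buildB_fuel_le (tree : List (Int × List Int)) (ifuel : Nat) :
    ∀ (bnd f : Nat) (l : List (Int × Int)) (off : Int),
      (buildB tree ifuel bnd f l off).2 ≤ f := by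
  intro bnd
  induction bnd with
  | zero => intro f l off; cases f <;> simp [buildB]
  | succ b ih =>
    intro f l off
    cases f with
    | zero => simp [buildB]
    | succ f =>
      cases l with
      | nil => simp [buildB]
      | cons e rest =>
        simp only [buildB]
        exact le_trans (le_trans (ih _ _ _) (ih _ _ _)) (Nat.le_succ f)

-- MAIN INVARIANT: A's stack loop from state st = B's pure recursion at offset st.1.length,
-- with st.1 prefixed to the chains and the edges grouped into st.2 (fuel matches too)
lemma loopA_eq_buildB (tree : List (Int × List Int)) (ifuel : Nat) :
    ∀ (bnd f : Nat), f ≤ bnd → ∀ (l : List (Int × Int)) st,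
      loopA tree ifuel f l st =
        ((st.1 ++ (buildB tree ifuel bnd f l (st.1.length)).1.1,
          (buildB tree ifuel bnd f l (st.1.length)).1.2.foldl
            (fun d e => growEdge d e.1 e.2) st.2),
         (buildB tree ifuel bnd f l (st.1.length)).2) := by
  intro bnd
  induction bnd with
  | zero =>
    intro f hf l st
    have h0 : f = 0 := Nat.le_zero.mp hf
    subst h0
    cases l <;> simp [loopA, buildB]
  | succ b ih =>
    intro f hf l st
    match f, l with
    | 0, l => cases l <;> simp [loopA, buildB]
    | f + 1, [] => simp [loopA, buildB]
    | f + 1, e :: rest =>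
      have hfb : f ≤ b := Nat.succ_le_succ_iff.mp hf
      simp only [loopA, buildB, doNode_eq]
      rw [loopA_split, ih f hfb]
      rw [ih _ (le_trans (buildB_fuel_le tree ifuel b f _ _) hfb)]
      simp only [kidsA_reverse, List.length_append, List.length_cons, List.length_nil,
        Nat.cast_add, Nat.cast_one, List.append_assoc, List.singleton_append,
        List.foldl_cons, List.foldl_append]
      push_cast
      ring_nf
      rfl

lemma ports_agree (tree : List (Int × List Int)) (root_id : Int) :
    collapse_tree tree root_id = collapse_tree_alt tree root_id := by
  unfold collapse_tree collapse_tree_alt tlook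
  split
  · rfl
  · cases h : PySem.Dict.get? (PySem.Dict.mk tree) root_id with
    | none => simp
    | some cs =>
      simp [
        loopA_eq_buildB tree (tree.length + 2) ((tree.length + 2) ^ (tree.length + 3))
          ((tree.length + 2) ^ (tree.length + 3)) (le_refl _),
        List.map_reverse]

-- ===== VERDICT (by name: the statement is the Claim_ definition above) =====
theorem collapse_tree_spec : Claim_equal_collapse_tree := by
  intro tree root_id _ _
  unfold Spec_collapse_tree
  exact ports_agree tree root_id
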